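-- pv_equiv track=rewrite | github.com/Mj-Promact/food-entities-ner | Preprocessing/spacy_helpers.py | prepare_spacy_data
-- ===== SOURCE A (Python) =====
-- def prepare_spacy_data(data: list) -> list:
--     """
--     Convert the data into spacy train data format.
--     Here data should be in following format, [(word, postag, tag), ...]
--     """
--
--     target_label = "FOOD"
--     spacy_data = []
--
--     for row in data:
--         words = []
--         entities = []
--         for i, (token, postag, tag) in enumerate(row):
--             words.append(token)
--
--             if tag == target_label:
--                 if i == 0:
--                     entities.append((i, len(token), target_label))
--                 else:
--                     st_pos = sum([len(word) for word in words[:-1]]) + i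
--                     end_pos = st_pos + len(token)
--                     entities.append((st_pos, end_pos, target_label))
--
--         spacy_data.append((" ".join(words[:-1])+words[-1], {"entities": entities}))
--
--     return spacy_data
-- ===== SOURCE B (Python) =====
-- def _token_starts(row):
--     """Character start offset of every token (space-separated layout)."""
--     starts, pos = [], 0
--     for tok, _, _ in row:
--         starts.append(pos)
--         pos += len(tok) + 1
--     return starts
--
--
-- def _spacy_row(row):
--     starts = _token_starts(row)
--     entities = [(s, s + len(tok), "FOOD")
--                 for s, (tok, _, tag) in zip(starts, row) if tag == "FOOD"]
--     words = [tok for tok, _, _ in row]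
--     return " ".join(words[:-1]) + words[-1], {"entities": entities}
--
--
-- def prepare_spacy_data(data: list) -> list:
--     return [_spacy_row(row) for row in data]
-- ===== Notes on version B (the rewrite author's own statement) =====
-- stated objective: alternative
-- what changed: B is a staged map over rows: it first materialises the list of token start offsets in one linear pass, then builds the entities by a zip+filter comprehension, instead of A's accumulator loop that re-sums the lengths of all previous tokens (a fresh prefix-sum comprehension) for every FOOD-tagged token.
import Mathlib
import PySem

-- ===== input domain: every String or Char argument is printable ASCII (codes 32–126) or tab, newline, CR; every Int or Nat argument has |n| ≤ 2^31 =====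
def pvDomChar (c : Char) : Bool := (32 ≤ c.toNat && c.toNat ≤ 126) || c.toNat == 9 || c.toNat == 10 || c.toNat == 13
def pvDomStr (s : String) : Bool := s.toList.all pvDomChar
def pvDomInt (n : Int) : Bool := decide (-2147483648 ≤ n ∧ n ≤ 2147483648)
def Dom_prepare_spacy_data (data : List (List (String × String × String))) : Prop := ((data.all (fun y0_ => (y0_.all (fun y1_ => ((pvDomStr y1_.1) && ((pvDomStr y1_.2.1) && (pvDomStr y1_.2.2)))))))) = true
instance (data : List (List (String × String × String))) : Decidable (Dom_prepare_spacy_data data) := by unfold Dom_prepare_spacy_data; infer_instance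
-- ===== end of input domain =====

-- B is a staged map per row (token-start list, then a zip+filter comprehension)
-- instead of A's accumulator loop re-summing prefix lengths per FOOD token
-- (objective: alternative decomposition).

-- ===== PORT A =====
-- inner-loop body of A: state = (words, entities), element = (i, (token, postag, tag))
def pvAstep (st : List String × List (Int × Int × String))
    (p : Int × (String × String × String)) : List String × List (Int × Int × String) :=
  let words := st.1 ++ [p.2.1]
  let entities :=
    if p.2.2.2 == "FOOD" then
      if p.1 == 0 then
        st.2 ++ [(p.1, PySem.Str.len p.2.1, "FOOD")]
      else
        let st_pos := ((PySem.List.slice words none (some (-1))).map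
          (fun w => PySem.Str.len w)).sum + p.1
        let end_pos := st_pos + PySem.Str.len p.2.1
        st.2 ++ [(st_pos, end_pos, "FOOD")]
    else st.2
  (words, entities)

def prepare_spacy_data (data : List (List (String × String × String))) : List (String × (List (String × List (Int × Int × String)))) :=
  data.foldl (fun spacy_data row =>
    let we := (PySem.List.enumerate row).foldl pvAstep ([], [])
    -- " ".join(words[:-1]) + words[-1]  (words[-1] raises on an empty row: Pre_)
    spacy_data ++ [(PySem.Str.join " " (PySem.List.slice we.1 none (some (-1)))
        ++ ((PySem.List.pyGet? we.1 (-1)).getD ""),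
      [("entities", we.2)])]) []

-- ===== PORT B =====
-- _token_starts: one linear pass collecting the start offset of each token
def pvTokenStarts (row : List (String × String × String)) : List Int :=
  (row.foldl (fun st r => (st.1 ++ [st.2], st.2 + PySem.Str.len r.1 + 1)) ([], 0)).1

-- _spacy_row: entities = zip+filter comprehension over the precomputed starts
def pvSpacyRow (row : List (String × String × String)) :
    String × List (String × List (Int × Int × String)) :=
  let starts := pvTokenStarts row
  let entities := (starts.zip row).filterMap (fun p =>
    if p.2.2.2 == "FOOD" then some (p.1, p.1 + PySem.Str.len p.2.1, "FOOD") else none)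
  let words := row.map (fun r => r.1)
  (PySem.Str.join " " (PySem.List.slice words none (some (-1)))
      ++ ((PySem.List.pyGet? words (-1)).getD ""),
   [("entities", entities)])

def prepare_spacy_data_alt (data : List (List (String × String × String))) : List (String × (List (String × List (Int × Int × String)))) :=
  data.map pvSpacyRow

-- ===== PRECONDITION & SPEC =====
-- Pre_ excludes inputs containing an empty row: there Python A raises IndexError
-- on words[-1] (and B raises the same way).
def Pre_prepare_spacy_data (data : List (List (String × String × String))) : Prop :=
  ∀ row ∈ data, row ≠ []
instance (data : List (List (String × String × String))) : Decidable (Pre_prepare_spacy_data data) := by unfold Pre_prepare_spacy_data; infer_instance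

def pvWitness_prepare_spacy_data : (List (List (String × String × String))) :=
  [[("apple", "NN", "FOOD"), ("pie", "NN", "O")]]

def Spec_prepare_spacy_data (data : List (List (String × String × String))) (out : List (String × (List (String × List (Int × Int × String))))) : Prop := out = prepare_spacy_data_alt data
instance (data : List (List (String × String × String))) (out : List (String × (List (String × List (Int × Int × String))))) : Decidable (Spec_prepare_spacy_data data out) := by
  unfold Spec_prepare_spacy_data
  -- nested DecidableEq built stepwise (plain infer_instance exceeds the search size on this type)
  haveI h1 : DecidableEq (String × List (Int × Int × String)) := inferInstance
  haveI h2 : DecidableEq (List (String × List (Int × Int × String))) := @instDecidableEqList _ h1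
  haveI h3 : DecidableEq (String × List (String × List (Int × Int × String))) := inferInstance
  haveI h4 : DecidableEq (List (String × List (String × List (Int × Int × String)))) := @instDecidableEqList _ h3
  exact h4 out (prepare_spacy_data_alt data)

-- ===== CLAIM (what is proved, stated in full; the proofs are below) =====
def Claim_equal_prepare_spacy_data : Prop := ∀ (data : List (List (String × String × String))), Dom_prepare_spacy_data data → Pre_prepare_spacy_data data → Spec_prepare_spacy_data data (prepare_spacy_data data)

-- ===== LEMMAS AND PROOFS =====

-- Reference entity list: the entities of a row whose first token starts at `pos`.
def pvEnts (pos : Int) : List (String × String × String) → List (Int × Int × String)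
  | [] => []
  | r :: t =>
      (if r.2.2 == "FOOD" then [(pos, pos + PySem.Str.len r.1, "FOOD")] else [])
        ++ pvEnts (pos + PySem.Str.len r.1 + 1) t

-- Reference start list from offset `pos`.
def pvSL (pos : Int) : List (String × String × String) → List Int
  | [] => []
  | r :: t => pos :: pvSL (pos + PySem.Str.len r.1 + 1) t

lemma pvTokenStarts_fold (row : List (String × String × String)) :
    ∀ (acc : List Int) (pos : Int),
      (row.foldl (fun st r => (st.1 ++ [st.2], st.2 + PySem.Str.len r.1 + 1)) (acc, pos)).1
        = acc ++ pvSL pos row := by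
  induction row with
  | nil => intro acc pos; simp [pvSL]
  | cons r t ih =>
    intro acc pos
    simp only [List.foldl_cons, pvSL]
    rw [ih]
    simp

lemma pvZip_filterMap (row : List (String × String × String)) :
    ∀ pos : Int,
      ((pvSL pos row).zip row).filterMap (fun p =>
          if p.2.2.2 == "FOOD" then some (p.1, p.1 + PySem.Str.len p.2.1, "FOOD") else none)
        = pvEnts pos row := by
  induction row with
  | nil => intro pos; simp [pvSL, pvEnts]
  | cons r t ih =>
    intro pos
    simp only [pvSL, pvEnts, List.zip_cons_cons, List.filterMap_cons]
    have h := ih (pos + PySem.Str.len r.1 + 1)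
    by_cases hf : (r.2.2 == "FOOD") = true
    · simpa [hf] using h
    · simpa [hf] using h

-- B's per-row entities are pvEnts 0 row.
lemma pvAlt_entities (row : List (String × String × String)) :
    ((pvTokenStarts row).zip row).filterMap (fun p =>
        if p.2.2.2 == "FOOD" then some (p.1, p.1 + PySem.Str.len p.2.1, "FOOD") else none)
      = pvEnts 0 row := by
  have h : pvTokenStarts row = pvSL 0 row := by
    simpa using pvTokenStarts_fold row [] 0
  rw [h, pvZip_filterMap]

-- A's inner fold, started on words ws (enumerate index ws.length), produces
-- words ws ++ tokens and entities es ++ pvEnts (running offset) row.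
lemma pv_row_inv (row : List (String × String × String)) :
    ∀ (ws : List String) (es : List (Int × Int × String)),
      (PySem.List.enumerate row (ws.length : Int)).foldl pvAstep (ws, es)
        = (ws ++ row.map (fun r => r.1),
           es ++ pvEnts ((ws.map PySem.Str.len).sum + ws.length) row) := by
  induction row with
  | nil => intro ws es; simp [PySem.List.enumerate_nil, pvEnts]
  | cons r rest ih =>
    intro ws es
    rw [PySem.List.enumerate_cons, List.foldl_cons]
    have hstep : pvAstep (ws, es) ((ws.length : Int), r)
        = (ws ++ [r.1],
           es ++ (if r.2.2 == "FOOD"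
             then [((ws.map PySem.Str.len).sum + ws.length,
                    (ws.map PySem.Str.len).sum + ws.length + PySem.Str.len r.1, "FOOD")]
             else [])) := by
      simp only [pvAstep, PySem.List.slice_to_neg_one, List.dropLast_concat]
      by_cases hf : (r.2.2 == "FOOD") = true
      · by_cases h0 : ws = []
        · subst h0; simp [hf]
        · have hlen0 : ws.length ≠ 0 := by simpa [List.length_eq_zero_iff] using h0
          have hne : (((ws.length : Nat) : Int) == 0) = false := by
            simp only [beq_eq_false_iff_ne, ne_eq, Int.natCast_eq_zero]
            exact hlen0
          have hlenfun : PySem.Str.len = (fun s : String => ((s.length : Nat) : Int)) :=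
            funext (fun s => PySem.Str.len_eq s)
          simp [hf, hne, hlenfun]
      · simp [hf]
    rw [hstep]
    have harg : ((ws.length : Int) + 1) = (((ws ++ [r.1]).length : Nat) : Int) := by simp
    rw [harg, ih (ws ++ [r.1])]
    have hpos : (((ws ++ [r.1]).map PySem.Str.len).sum + ((ws ++ [r.1]).length : Int))
        = (ws.map PySem.Str.len).sum + ws.length + PySem.Str.len r.1 + 1 := by
      simp; ring
    rw [hpos]
    simp [pvEnts]

lemma pv_row_eq (row : List (String × String × String)) :
    (PySem.List.enumerate row).foldl pvAstep ([], [])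
      = (row.map (fun r => r.1), pvEnts 0 row) := by
  simpa using pv_row_inv row [] []

-- ===== VERDICT (by name: the statement is the Claim_ definition above) =====
theorem prepare_spacy_data_spec : Claim_equal_prepare_spacy_data := by
  intro data _ _
  unfold Spec_prepare_spacy_data prepare_spacy_data prepare_spacy_data_alt
  rw [PySem.List.foldl_append_singleton_eq_map]
  refine (List.nil_append _).trans (List.map_congr_left ?_)
  intro row _
  rw [pv_row_eq row]
  simp only [pvSpacyRow, pvAlt_entities]
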